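-- pv_equiv track=rewrite | github.com/i2bc/ORFmine | venv-3.9/lib/python3.9/site-packages/pyHCA/core/annotateHCA.py | _transformSequence
-- ===== SOURCE A (Python) =====
-- def _transformSequence(seq, low_complexity=[], hydrophobe="YIMLFWVC"):
--     """ transforme amino acid string chain into kind of HCA code as 1-> YIMLFWV  P-> P  0-> other
--
--     Parameters
--     ----------
--     seq ; string
--         amino acid sequence
--     low_complexity ; list
--         list of positions of low complexity
--     hydrophobe: string
--         define hydrophobic residue used by the HCA method
--     Return
--     ------
--     setrans : string
--         code of the sequence as a string chain such as 1-> YIMLFWV  P-> P  0-> other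
--     """
--     #===========================================================================
--     # get the binary code
--     # 1-> YIMLFWV
--     # P-> P
--     # * -> *
--     # 0-> other
--     #===========================================================================
--     seqtrans = ""
--     for ite, aa in enumerate(seq):
--         AA = aa.upper()
--         if low_complexity and ite+1 in low_complexity:
--             seqtrans += "0"
--         elif AA  in hydrophobe:
--             seqtrans += "1"
--         elif AA == "P":
--             seqtrans += "P"
--         elif AA == "*": #stop
--             seqtrans += "*"
--         else:
--             seqtrans += "0"
--     return seqtrans
-- ===== SOURCE B (Python) =====
-- def _transformSequence(seq, low_complexity=[], hydrophobe="YIMLFWVC"):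
--     # One pass to classify, then one pass over the low-complexity positions to mask.
--     code = []
--     for aa in seq:
--         AA = aa.upper()
--         if AA in hydrophobe:
--             code.append("1")
--         elif AA == "P":
--             code.append("P")
--         elif AA == "*":
--             code.append("*")
--         else:
--             code.append("0")
--     n = len(seq)
--     for p in low_complexity:
--         if 1 <= p <= n:
--             code[p - 1] = "0"
--     return "".join(code)
-- ===== Notes on version B (the rewrite author's own statement) =====
-- stated objective: faster
-- what changed: Instead of A's single loop that scans low_complexity for membership at every residue, B classifies each residue in one pass into a list and then iterates over low_complexity itself, masking each in-range position to the zero code before joining.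
import Mathlib
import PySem

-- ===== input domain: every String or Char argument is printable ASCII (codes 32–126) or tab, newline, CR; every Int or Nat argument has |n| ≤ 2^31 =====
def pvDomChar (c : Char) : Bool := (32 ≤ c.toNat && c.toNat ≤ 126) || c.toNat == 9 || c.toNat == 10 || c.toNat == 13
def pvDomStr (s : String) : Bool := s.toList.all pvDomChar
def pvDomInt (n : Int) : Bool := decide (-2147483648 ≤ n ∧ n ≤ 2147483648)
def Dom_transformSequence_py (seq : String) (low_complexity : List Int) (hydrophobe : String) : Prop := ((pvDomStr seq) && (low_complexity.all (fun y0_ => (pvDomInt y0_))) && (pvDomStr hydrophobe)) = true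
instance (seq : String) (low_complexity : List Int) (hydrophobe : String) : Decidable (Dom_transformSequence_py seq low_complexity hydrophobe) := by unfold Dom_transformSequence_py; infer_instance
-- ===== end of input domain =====

-- B replaces A's per-character membership scan of low_complexity with a single classify
-- pass followed by one masking pass over low_complexity itself (O(n+m) vs O(n·m)).

-- ===== PORT A =====
def transformSequence_py (seq : String) (low_complexity : List Int) (hydrophobe : String) : String :=
  String.ofList ((PySem.List.enumerate seq.toList).foldl (fun seqtrans p =>
    let AA := PySem.Chars.upper [p.2]
    if low_complexity ≠ [] ∧ (p.1 + 1) ∈ low_complexity then seqtrans ++ ['0']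
    else if PySem.Chars.isIn AA hydrophobe.toList then seqtrans ++ ['1']
    else if AA = ['P'] then seqtrans ++ ['P']
    else if AA = ['*'] then seqtrans ++ ['*']
    else seqtrans ++ ['0']) [])

-- ===== PORT B =====
-- classification of one residue (B's first pass, per character)
def pvClassify (hydrophobe : List Char) (aa : Char) : Char :=
  let AA := PySem.Chars.upper [aa]
  if PySem.Chars.isIn AA hydrophobe then '1'
  else if AA = ['P'] then 'P'
  else if AA = ['*'] then '*'
  else '0'

def transformSequence_py_alt (seq : String) (low_complexity : List Int) (hydrophobe : String) : String :=
  let code := seq.toList.map (pvClassify hydrophobe.toList)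
  let n : Int := PySem.Str.len seq
  String.ofList (low_complexity.foldl (fun c p =>
    if 1 ≤ p ∧ p ≤ n then PySem.List.pySetD c (p - 1) '0' else c) code)

-- ===== PRECONDITION & SPEC =====
def Spec_transformSequence_py (seq : String) (low_complexity : List Int) (hydrophobe : String) (out : String) : Prop := out = transformSequence_py_alt seq low_complexity hydrophobe
instance (seq : String) (low_complexity : List Int) (hydrophobe : String) (out : String) : Decidable (Spec_transformSequence_py seq low_complexity hydrophobe out) := by unfold Spec_transformSequence_py; infer_instance

-- ===== CLAIM (what is proved, stated in full; the proofs are below) =====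
def Claim_equal_transformSequence_py : Prop := ∀ (seq : String) (low_complexity : List Int) (hydrophobe : String), Dom_transformSequence_py seq low_complexity hydrophobe → Spec_transformSequence_py seq low_complexity hydrophobe (transformSequence_py seq low_complexity hydrophobe)

-- ===== LEMMAS AND PROOFS =====

-- the per-position value A produces, as a function of (index, char)
def pvAChar (low : List Int) (hyd : List Char) (p : Int × Char) : Char :=
  if low ≠ [] ∧ (p.1 + 1) ∈ low then '0' else pvClassify hyd p.2

lemma pvA_fold_eq_map (low : List Int) (hyd : List Char) (l : List (Int × Char)) (acc : List Char) :
    l.foldl (fun seqtrans p =>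
      let AA := PySem.Chars.upper [p.2]
      if low ≠ [] ∧ (p.1 + 1) ∈ low then seqtrans ++ ['0']
      else if PySem.Chars.isIn AA hyd then seqtrans ++ ['1']
      else if AA = ['P'] then seqtrans ++ ['P']
      else if AA = ['*'] then seqtrans ++ ['*']
      else seqtrans ++ ['0']) acc = acc ++ l.map (pvAChar low hyd) := by
  have h : (fun (seqtrans : List Char) (p : Int × Char) =>
      let AA := PySem.Chars.upper [p.2]
      if low ≠ [] ∧ (p.1 + 1) ∈ low then seqtrans ++ ['0']
      else if PySem.Chars.isIn AA hyd then seqtrans ++ ['1']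
      else if AA = ['P'] then seqtrans ++ ['P']
      else if AA = ['*'] then seqtrans ++ ['*']
      else seqtrans ++ ['0'])
      = fun seqtrans p => seqtrans ++ [pvAChar low hyd p] := by
    funext seqtrans p
    simp only [pvAChar, pvClassify]
    split_ifs <;> rfl
  rw [h, PySem.List.foldl_append_singleton_eq_map]

-- B's masking pass preserves the length of the code list
lemma pvMask_length (n : Int) (low : List Int) (code : List Char) :
    (low.foldl (fun code p =>
      if 1 ≤ p ∧ p ≤ n then PySem.List.pySetD code (p - 1) '0' else code) code).length
      = code.length := by
  induction low generalizing code with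
  | nil => rfl
  | cons x low ih =>
    simp only [List.foldl_cons]
    rw [ih]
    split_ifs
    · simp [PySem.List.length_pySetD]
    · rfl

-- what B's masking pass leaves at index i
lemma pvMask_get (n : Int) (low : List Int) (code : List Char) (hn : n = code.length)
    (i : Nat) (hi : i < code.length) :
    (low.foldl (fun c p =>
      if 1 ≤ p ∧ p ≤ n then PySem.List.pySetD c (p - 1) '0' else c) code)[i]?
      = if ((i : Int) + 1) ∈ low then some '0' else code[i]? := by
  induction low generalizing code with
  | nil => simp
  | cons x low ih =>
    simp only [List.foldl_cons]
    set code' := if 1 ≤ x ∧ x ≤ n then PySem.List.pySetD code (x - 1) '0' else code with hc'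
    have hlen : code'.length = code.length := by
      rw [hc']; split_ifs
      · simp [PySem.List.length_pySetD]
      · rfl
    rw [ih code' (by omega) (hlen ▸ hi)]
    by_cases hx : x = (i : Int) + 1
    · have hmem : ((i : Int) + 1) ∈ x :: low := by simp [hx]
      have hget : code'[i]? = some '0' := by
        rw [hc']
        have : (1 ≤ x ∧ x ≤ n) := by constructor <;> omega
        rw [if_pos this]
        have hx1 : x - 1 = ((i : Nat) : Int) := by omega
        rw [hx1, PySem.List.pySetD_natCast]
        simp [hi]
      by_cases hm : ((i : Int) + 1) ∈ low <;> simp [hm, hmem, hget]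
    · have hget : code'[i]? = code[i]? := by
        rw [hc']; split_ifs with hg
        · rw [PySem.List.pySetD_of_nonneg code '0' (show (0:Int) ≤ x - 1 by omega)]
          rw [List.getElem?_set_ne]
          omega
        · rfl
      have hmem : (((i : Int) + 1) ∈ x :: low) ↔ (((i : Int) + 1) ∈ low) := by
        simp [List.mem_cons]
        intro h; exact absurd h.symm hx
      by_cases hm : ((i : Int) + 1) ∈ low <;> simp [hm, hget, hmem]

-- ===== VERDICT (by name: the statement is the Claim_ definition above) =====
theorem transformSequence_py_spec : Claim_equal_transformSequence_py := by
  intro seq low hyd _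
  simp only [Spec_transformSequence_py, transformSequence_py, transformSequence_py_alt]
  rw [pvA_fold_eq_map, List.nil_append]
  apply congrArg String.ofList
  have hmask := pvMask_get (PySem.Str.len seq) low (seq.toList.map (pvClassify hyd.toList))
    (by simp [PySem.Str.len_eq])
  have hlenB := pvMask_length (PySem.Str.len seq) low (seq.toList.map (pvClassify hyd.toList))
  apply List.ext_getElem?
  intro i
  by_cases hi : i < seq.toList.length
  · rw [hmask i (by simpa using hi)]
    rw [List.getElem?_map, PySem.List.getElem?_enumerate, List.getElem?_eq_getElem hi]
    by_cases hm : ((i : Int) + 1) ∈ low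
    · have hne : low ≠ [] := List.ne_nil_of_mem hm
      simp [pvAChar, hm, hne]
    · simp [pvAChar, hm]
      exact ⟨_, List.getElem?_eq_getElem hi, rfl⟩
  · rw [List.getElem?_eq_none, List.getElem?_eq_none]
    · rw [hlenB]; simp only [List.length_map]; omega
    · simp only [List.length_map, PySem.List.length_enumerate]; omega
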